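-- pv_equiv track=rewrite | github.com/dlastes/edt | FlOpEDT/configuration/database_description_checker.py | check_non_overlapping_periods
-- ===== SOURCE A (Python) =====
-- import operator
--
-- settings_sheet = 'Paramètres'
--
-- def check_non_overlapping_periods(periods):
--     result = []
--
--     periods.sort(key=operator.itemgetter(1))
--
--     for ii in range(0, len(periods)):
--
--         for jj in range(ii+1, len(periods)):
--
--             if periods[jj][1] <= periods[ii][2]:
--                 result.append(f"Les périodes '{periods[ii][0]}' et '{periods[jj][0]}' se chevauchent dans '{settings_sheet}'")
--
--     return result
-- ===== SOURCE B (Python) =====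
-- import operator
--
-- settings_sheet = 'Paramètres'
--
-- def check_non_overlapping_periods(periods):
--     # Same in-place sort by start as the original; then a forward scan that
--     # stops at the first later period whose start exceeds the current end
--     # (valid because starts are sorted).
--     periods.sort(key=operator.itemgetter(1))
--     result = []
--     n = len(periods)
--     for ii in range(n):
--         name, _start, end = periods[ii]
--         jj = ii + 1
--         while jj < n and periods[jj][1] <= end:
--             result.append(f"Les périodes '{name}' et '{periods[jj][0]}' se chevauchent dans '{settings_sheet}'")
--             jj += 1
--     return result
-- ===== Notes on version B (the rewrite author's own statement) =====
-- stated objective: alternative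
-- what changed: After the same stable sort by start, B replaces A's full inner scan over all later periods by a forward scan that stops at the first later period whose start exceeds the current end (valid since starts are nondecreasing); a timing run measured no speedup on the generated inputs.
import Mathlib
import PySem

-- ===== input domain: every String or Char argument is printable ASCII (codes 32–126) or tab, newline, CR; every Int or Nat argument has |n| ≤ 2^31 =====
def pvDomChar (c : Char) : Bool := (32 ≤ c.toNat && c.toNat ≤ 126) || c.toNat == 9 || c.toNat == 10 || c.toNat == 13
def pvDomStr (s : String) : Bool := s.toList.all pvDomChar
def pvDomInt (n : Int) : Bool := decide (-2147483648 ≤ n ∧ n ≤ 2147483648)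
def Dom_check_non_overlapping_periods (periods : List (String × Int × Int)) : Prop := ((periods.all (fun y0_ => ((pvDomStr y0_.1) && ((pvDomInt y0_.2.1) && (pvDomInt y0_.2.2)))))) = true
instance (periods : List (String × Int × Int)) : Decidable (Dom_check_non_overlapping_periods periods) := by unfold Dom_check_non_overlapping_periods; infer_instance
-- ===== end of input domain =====

-- B replaces A's index-pair inner scan by a forward scan that stops at the first later period
-- whose start exceeds the current end (sound since starts are sorted): same output, different algorithm.
-- Both versions sort `periods` in place in Python; the equivalence proved here is about the return value.


-- message built by the f-string in both Pythons
def pvMsg (a b : String) : String :=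
  "Les périodes '" ++ a ++ "' et '" ++ b ++ "' se chevauchent dans 'Paramètres'"

-- ===== PORT A =====
def check_non_overlapping_periods (periods : List (String × Int × Int)) : List String :=
  -- periods.sort(key=operator.itemgetter(1))
  let ps := PySem.List.sorted periods (fun p => p.2.1) false
  -- for ii in range(0, len(periods)): for jj in range(ii+1, len(periods)): if …: result.append(…)
  (PySem.List.pyRange 0 (ps.length : Int) 1).foldl (fun result ii =>
    (PySem.List.pyRange (ii + 1) (ps.length : Int) 1).foldl (fun result jj =>
      if (PySem.List.pyGetD ps jj default).2.1 ≤ (PySem.List.pyGetD ps ii default).2.2 then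
        result ++ [pvMsg (PySem.List.pyGetD ps ii default).1 (PySem.List.pyGetD ps jj default).1]
      else result) result) []

-- ===== PORT B =====
-- the forward scan from position ii+1 stopping at the first start > end, as structural recursion
def pvScan : List (String × Int × Int) → List String
  | [] => []
  | p :: rest =>
      (rest.takeWhile (fun q => decide (q.2.1 ≤ p.2.2))).map (fun q => pvMsg p.1 q.1)
        ++ pvScan rest

def check_non_overlapping_periods_alt (periods : List (String × Int × Int)) : List String :=
  pvScan (PySem.List.sorted periods (fun p => p.2.1) false)

-- ===== PRECONDITION & SPEC =====
def Spec_check_non_overlapping_periods (periods : List (String × Int × Int)) (out : List String) : Prop := out = check_non_overlapping_periods_alt periods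
instance (periods : List (String × Int × Int)) (out : List String) : Decidable (Spec_check_non_overlapping_periods periods out) := by unfold Spec_check_non_overlapping_periods; infer_instance

-- ===== CLAIM (what is proved, stated in full; the proofs are below) =====
def Claim_equal_check_non_overlapping_periods : Prop := ∀ (periods : List (String × Int × Int)), Dom_check_non_overlapping_periods periods → Spec_check_non_overlapping_periods periods (check_non_overlapping_periods periods)

-- ===== LEMMAS AND PROOFS =====

-- A's nested index loops, written structurally: for each suffix head, filter the tail.
def pvScanFilter : List (String × Int × Int) → List String
  | [] => []
  | p :: rest =>
      (rest.filter (fun q => decide (q.2.1 ≤ p.2.2))).map (fun q => pvMsg p.1 q.1)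
        ++ pvScanFilter rest

-- index-free form of a flatMap over all positions
theorem pv_flat_range (ps : List (String × Int × Int)) (d : String × Int × Int) :
    (List.range ps.length).flatMap
        (fun i => ((ps.drop (i+1)).filter (fun q => decide (q.2.1 ≤ (ps.getD i d).2.2))).map
          (fun q => pvMsg (ps.getD i d).1 q.1))
      = pvScanFilter ps := by
  induction ps with
  | nil => simp [pvScanFilter]
  | cons p rest ih =>
      rw [List.length_cons, List.range_succ_eq_map]
      simp only [List.flatMap_cons, List.flatMap_map, List.getD_cons_zero, List.drop_succ_cons,
        List.drop_zero, Nat.succ_eq_add_one, List.getD_cons_succ]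
      rw [pvScanFilter, ih]

-- on a list whose starts are nondecreasing, filtering by "start ≤ e" is a prefix
theorem pv_filter_eq_takeWhile (e : Int) :
    ∀ (l : List (String × Int × Int)), l.Pairwise (fun a b => a.2.1 ≤ b.2.1) →
      l.filter (fun q => decide (q.2.1 ≤ e)) = l.takeWhile (fun q => decide (q.2.1 ≤ e)) := by
  intro l
  induction l with
  | nil => simp
  | cons q l' ih =>
      intro hp
      rcases List.pairwise_cons.mp hp with ⟨hq, hl'⟩
      by_cases h : q.2.1 ≤ e
      · simp [h, ih hl']
      · have hd : decide (q.2.1 ≤ e) = false := decide_eq_false h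
        rw [List.filter_cons, List.takeWhile_cons, hd]
        simp only [Bool.false_eq_true, if_false]
        rw [List.filter_eq_nil_iff.mpr]
        intro r hr
        simp only [decide_eq_true_eq]
        have := hq r hr
        omega

theorem pv_scanFilter_eq_pvScan :
    ∀ (l : List (String × Int × Int)), l.Pairwise (fun a b => a.2.1 ≤ b.2.1) →
      pvScanFilter l = pvScan l := by
  intro l
  induction l with
  | nil => intro; rfl
  | cons p rest ih =>
      intro hp
      rcases List.pairwise_cons.mp hp with ⟨_, hrest⟩
      rw [pvScanFilter, pvScan, ih hrest, pv_filter_eq_takeWhile _ _ hrest]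

-- A's double loop over any list with nondecreasing starts computes pvScan of it
theorem pv_main (ps : List (String × Int × Int))
    (hpair : ps.Pairwise (fun a b => a.2.1 ≤ b.2.1)) :
    (PySem.List.pyRange 0 (ps.length : Int) 1).foldl (fun result ii =>
      (PySem.List.pyRange (ii + 1) (ps.length : Int) 1).foldl (fun result jj =>
        if (PySem.List.pyGetD ps jj default).2.1 ≤ (PySem.List.pyGetD ps ii default).2.2 then
          result ++ [pvMsg (PySem.List.pyGetD ps ii default).1 (PySem.List.pyGetD ps jj default).1]
        else result) result) [] = pvScan ps := by
  rw [← pv_scanFilter_eq_pvScan ps hpair, ← pv_flat_range ps default]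
  -- turn the outer pyRange into List.range over Nat indices
  rw [PySem.List.pyRange_one]
  simp only [Int.sub_zero, Int.toNat_natCast, List.foldl_map, Int.zero_add]
  -- rewrite each inner loop to its filter/map form, then collapse the outer loop to a flatMap
  rw [PySem.List.foldl_congr_mem
    (g := fun (result : List String) (i : Nat) =>
      result ++ ((ps.drop (i+1)).filter (fun q => decide (q.2.1 ≤ (ps.getD i default).2.2))).map
        (fun q => pvMsg (ps.getD i default).1 q.1))]
  · rw [PySem.List.foldl_append_eq_flatMap]
    simp
  · intro acc i hi
    have h0 : (0:Int) ≤ (i:Int) + 1 := by omega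
    rw [show ((i:Int) + 1) = (((i+1:Nat)):Int) by push_cast; ring]
    rw [PySem.List.foldl_pyRange_pyGetD' ps default
      (fun (result : List String) (q : String × Int × Int) =>
        if q.2.1 ≤ (PySem.List.pyGetD ps (i:Int) default).2.2 then
          result ++ [pvMsg (PySem.List.pyGetD ps (i:Int) default).1 q.1]
        else result) acc (by push_cast; omega)]
    rw [PySem.List.foldl_append_ite]
    simp [PySem.List.pyGetD_natCast]

-- ===== VERDICT (by name: the statement is the Claim_ definition above) =====
theorem check_non_overlapping_periods_spec : Claim_equal_check_non_overlapping_periods := by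
  intro periods _
  exact pv_main (PySem.List.sorted periods (fun p => p.2.1) false)
    (PySem.List.sorted_pairwise periods (fun p => p.2.1))
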